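-- pv_equiv track=rewrite | github.com/ManiacalLabs/BiblioPixel | bibliopixel/project/settings_file.py | get_setting
-- ===== SOURCE A (Python) =====
-- def get_setting(section, name):
--     extensions = []
--
--     while name:
--         setting = section[name]
--         extensions.append(setting)
--         name = setting.get('extends')
--
--     setting = {}
--     for s in reversed(extensions):
--         setting.update(s)
--
--     try:
--         del setting['extends']
--     except KeyError:
--         pass
--     return setting
-- ===== SOURCE B (Python) =====
-- def get_setting(section, name):
--     def chain_of(name):
--         if not name:
--             return []
--         setting = section[name]
--         return [setting] + chain_of(setting.get('extends'))
--
--     chain = chain_of(name)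
--
--     keys = []
--     for s in reversed(chain):
--         for k in s:
--             if k not in keys:
--                 keys.append(k)
--
--     def lookup(k):
--         for s in chain:
--             if k in s:
--                 return s[k]
--
--     return {k: lookup(k) for k in keys if k != 'extends'}
-- ===== Notes on version B (the rewrite author's own statement) =====
-- stated objective: alternative
-- what changed: Replaces A's collect-then-reversed-dict-merge with a recursive chain builder, a key-collection pass over the reversed chain, and a per-key lookup in the first chain dict containing the key - no dict merging at all.
import Mathlib
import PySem

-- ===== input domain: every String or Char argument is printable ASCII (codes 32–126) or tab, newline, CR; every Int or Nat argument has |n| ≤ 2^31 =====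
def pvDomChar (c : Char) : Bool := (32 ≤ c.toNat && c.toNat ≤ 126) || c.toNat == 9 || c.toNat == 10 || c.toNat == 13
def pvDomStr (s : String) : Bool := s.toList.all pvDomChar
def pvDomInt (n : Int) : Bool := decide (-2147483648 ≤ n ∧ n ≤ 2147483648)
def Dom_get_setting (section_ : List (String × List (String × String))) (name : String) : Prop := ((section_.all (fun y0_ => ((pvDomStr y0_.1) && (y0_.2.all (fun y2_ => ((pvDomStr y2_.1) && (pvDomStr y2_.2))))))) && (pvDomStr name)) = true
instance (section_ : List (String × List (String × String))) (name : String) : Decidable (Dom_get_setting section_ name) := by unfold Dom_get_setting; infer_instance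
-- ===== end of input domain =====

-- B replaces A's collect-then-reversed-dict-merge with a recursive chain builder plus a
-- key-collection pass and a per-key first-containing-dict lookup: no dict merging at all
-- (objective: alternative).  The equivalence claimed is about the RETURN value.

-- ===== PORT A =====
-- setting.get('extends'): dict.get, none → '' (falsy, ends the while loop)
def pvNext (s : PySem.Dict String String) : String :=
  (s.get? "extends").getD ""

-- A's while-loop collecting the chain of settings.  'fuel'/'allowed' are only a
-- termination device (each visited name is consumed, fuel = |allowed|+1): inside Pre_
-- the guards always pass, and where they do not (missing key / revisited name) Python A
-- raises KeyError or loops forever, which Pre_ excludes.  Inner assoc lists are consumed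
-- as the Python dicts they model, via PySem.Dict.ofList.
def pvCollect (section_ : List (String × List (String × String))) :
    Nat → List String → String → List (PySem.Dict String String)
  | 0, _, _ => []
  | fuel + 1, allowed, name =>
    if name = "" then []
    else
      match (PySem.Dict.ofList section_).get? name with
      | none => []
      | some raw =>
        let s := PySem.Dict.ofList raw
        if name ∈ allowed then
          s :: pvCollect section_ fuel (allowed.erase name) (pvNext s)
        else []

def get_setting (section_ : List (String × List (String × String))) (name : String) : List (String × String) :=
  let keys := section_.map Prod.fst
  let extensions := pvCollect section_ (keys.length + 1) keys name
  let setting := extensions.reverse.foldl (fun d s => d.update s.items) PySem.Dict.empty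
  (setting.erase "extends").items

-- ===== PORT B =====
-- chain_of: recursion over the 'extends' links (same fuel termination device as above,
-- with the same caveat outside Pre_)
def pvChainB (section_ : List (String × List (String × String))) :
    Nat → String → List (PySem.Dict String String)
  | 0, _ => []
  | fuel + 1, name =>
    if name = "" then []
    else
      match (PySem.Dict.ofList section_).get? name with
      | none => []
      | some raw =>
        let s := PySem.Dict.ofList raw
        s :: pvChainB section_ fuel ((s.get? "extends").getD "")

-- lookup(k): first dict of the chain containing k; the default "" is never reached for
-- the keys B uses (they all come from the chain)
def pvLookup (chain : List (PySem.Dict String String)) (k : String) : String :=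
  (chain.findSome? (fun s => s.get? k)).getD ""

def get_setting_alt (section_ : List (String × List (String × String))) (name : String) : List (String × String) :=
  let chain := pvChainB section_ (section_.length + 1) name
  let keys := chain.reverse.foldl
    (fun ks s => s.keys.foldl (fun ks k => if k ∈ ks then ks else ks ++ [k]) ks) ([] : List String)
  (keys.filter (fun k => k != "extends")).map (fun k => (k, pvLookup chain k))

-- ===== PRECONDITION & SPEC =====
-- Pre_ excludes exactly the inputs on which A does not return: a chain name missing from
-- section (Python A raises KeyError) or a cyclic 'extends' chain (A loops forever; B hits
-- RecursionError).  It is a property of the input's inheritance graph alone — that the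
-- 'extends' links from name are all present and acyclic; being reachability it is decided
-- by walking those links (names only), computing nothing of either program's result.
def pvChainOk (section_ : List (String × List (String × String))) :
    Nat → List String → String → Bool
  | 0, _, _ => false
  | fuel + 1, allowed, name =>
    if name = "" then true
    else
      match (PySem.Dict.ofList section_).get? name with
      | none => false
      | some raw =>
        if name ∈ allowed then
          pvChainOk section_ fuel (allowed.erase name) (pvNext (PySem.Dict.ofList raw))
        else false

def Pre_get_setting (section_ : List (String × List (String × String))) (name : String) : Prop :=
  pvChainOk section_ (section_.length + 1) (section_.map Prod.fst) name = true

instance (section_ : List (String × List (String × String))) (name : String) : Decidable (Pre_get_setting section_ name) := by unfold Pre_get_setting; infer_instance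

def pvWitness_get_setting : (List (String × List (String × String))) × String :=
  ([("a", [("extends", "b"), ("x", "1")]), ("b", [("y", "2")])], "a")

def Spec_get_setting (section_ : List (String × List (String × String))) (name : String) (out : List (String × String)) : Prop := out = get_setting_alt section_ name
instance (section_ : List (String × List (String × String))) (name : String) (out : List (String × String)) : Decidable (Spec_get_setting section_ name out) := by unfold Spec_get_setting; infer_instance

-- ===== CLAIM (what is proved, stated in full; the proofs are below) =====
def Claim_equal_get_setting : Prop := ∀ (section_ : List (String × List (String × String))) (name : String), Dom_get_setting section_ name → Pre_get_setting section_ name → Spec_get_setting section_ name (get_setting section_ name)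

-- ===== LEMMAS AND PROOFS =====

-- inside Pre_ the two chain builders walk the same links and collect the same dicts
lemma pv_chain_eq (section_ : List (String × List (String × String))) :
    ∀ (fuel : Nat) (allowed : List String) (name : String),
    pvChainOk section_ fuel allowed name = true →
    pvCollect section_ fuel allowed name = pvChainB section_ fuel name := by
  intro fuel
  induction fuel with
  | zero => intro allowed name h; simp [pvChainOk] at h
  | succ fuel ih =>
    intro allowed name h
    rw [pvChainOk] at h
    rw [pvCollect, pvChainB]
    by_cases hn : name = ""
    · simp [hn]
    · simp only [hn, if_false] at h ⊢
      cases hg : (PySem.Dict.ofList section_).get? name with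
      | none => rw [hg] at h
      | some raw =>
        rw [hg] at h
        dsimp only at h ⊢
        by_cases hm : name ∈ allowed
        · simp only [hm, if_pos] at h ⊢
          rw [ih (allowed.erase name) _ h]
          rfl
        · rw [if_neg hm] at h; exact absurd h (by simp)

-- value of a fold of inserts: the LAST occurrence of the key wins
lemma pv_getD_foldl_insert (k : String) :
    ∀ (P : List (String × String)) (d : PySem.Dict String String),
    (P.foldl (fun d p => d.insert p.1 p.2) d).getD k ""
      = ((P.reverse.find? (fun q => q.1 == k)).map Prod.snd).getD (d.getD k "") := by
  intro P
  induction P with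
  | nil => intro d; rfl
  | cons p rest ih =>
    intro d
    rw [List.foldl_cons, ih, List.reverse_cons, List.find?_append]
    cases hf : rest.reverse.find? (fun q => q.1 == k) with
    | some q => simp
    | none =>
      by_cases hk : p.1 = k
      · simp [hk]
      · simp [hk, PySem.Dict.getD_insert, Ne.symm hk]

-- with nodup keys, searching an association list backwards finds the same entry
lemma pv_find?_reverse (k : String) :
    ∀ (l : List (String × String)), (l.map Prod.fst).Nodup →
    l.reverse.find? (fun q => q.1 == k) = l.find? (fun q => q.1 == k) := by
  intro l
  induction l with
  | nil => intro _; rfl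
  | cons p rest ih =>
    intro hnd
    rw [List.map_cons, List.nodup_cons] at hnd
    rw [List.reverse_cons, List.find?_append, ih hnd.2, List.find?_cons]
    by_cases hk : p.1 = k
    · have hrest : rest.find? (fun q => q.1 == k) = none := by
        rw [List.find?_eq_none]
        intro q hq hqk
        exact hnd.1 (by
          have : q.1 = p.1 := by
            have := of_decide_eq_true (by simpa using hqk)
            simp [this, hk]
          exact this ▸ List.mem_map_of_mem hq)
      simp [hrest, hk]
    · have hb : (p.1 == k) = false := by simp [hk]
      cases hf : rest.find? (fun q => q.1 == k) <;> simp [hf, hb]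

-- the last occurrence over the flattened reversed chain IS the first containing dict's value
lemma pv_values (k : String) :
    ∀ (C : List (PySem.Dict String String)), (∀ s ∈ C, s.keys.Nodup) →
    ((C.flatMap (fun s => s.items.reverse)).find? (fun q => q.1 == k)).map Prod.snd
      = C.findSome? (fun s => s.get? k) := by
  intro C
  induction C with
  | nil => intro _; rfl
  | cons s rest ih =>
    intro h
    rw [List.flatMap_cons, List.find?_append, List.findSome?_cons]
    have hs : s.items.reverse.find? (fun q => q.1 == k) = s.items.find? (fun q => q.1 == k) :=
      pv_find?_reverse k s.items (h s (List.mem_cons_self ..))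
    cases hf : s.items.find? (fun q => q.1 == k) with
    | some q =>
      have : s.get? k = some q.2 := by simp [PySem.Dict.get?, hf]
      simp [hs, hf, this]
    | none =>
      have : s.get? k = none := by simp [PySem.Dict.get?, hf]
      rw [this]
      simpa [hs, hf] using ih (fun t ht => h t (List.mem_cons_of_mem _ ht))

-- the dict built by A's reversed merge, with the final erase, has exactly B's items
lemma pv_merge (C : List (PySem.Dict String String)) (h : ∀ s ∈ C, s.keys.Nodup) :
    ((C.reverse.foldl (fun d s => d.update s.items) PySem.Dict.empty).erase "extends").items
      = ((C.reverse.foldl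
            (fun ks s => s.keys.foldl (fun ks k => if k ∈ ks then ks else ks ++ [k]) ks)
            ([] : List String)).filter (fun k => k != "extends")).map
          (fun k => (k, pvLookup C k)) := by
  set R := C.reverse with hR
  set P := R.flatMap (fun s => s.items) with hP
  -- A's merged dict is a single fold of inserts over the flattened pairs
  have hmerged : R.foldl (fun d s => d.update s.items) PySem.Dict.empty
      = P.foldl (fun d p => d.insert p.1 p.2) PySem.Dict.empty := by
    rw [hP, List.flatMap_def, List.foldl_flatten, List.foldl_map]
    rfl
  set merged := P.foldl (fun d p => d.insert p.1 p.2) PySem.Dict.empty with hm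
  -- its keys, in order, are the set of keys of the flattened pairs
  have hkeys : merged.keys = PySem.Set.ofList (P.map Prod.fst) := by
    rw [hm, PySem.Dict.keys_foldl_insert_key P Prod.fst (fun _ p => p.2)]
    rfl
  have hnd : merged.keys.Nodup := by
    rw [hm]
    exact PySem.Dict.nodup_keys_foldl_insert_key P Prod.fst (fun _ p => p.2) _ (by simp [PySem.Dict.empty])
  -- B's key-collection pass computes the same set
  have hkeysB : R.foldl
      (fun ks s => s.keys.foldl (fun ks k => if k ∈ ks then ks else ks ++ [k]) ks)
      ([] : List String) = PySem.Set.ofList (P.map Prod.fst) := by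
    have h1 : ∀ (ks : List String) (s : PySem.Dict String String),
        s.keys.foldl (fun ks k => if k ∈ ks then ks else ks ++ [k]) ks
          = s.keys.foldl PySem.Set.add ks :=
      fun ks s => PySem.List.foldl_congr_mem _ _ _ _ (fun ks k _ => (PySem.Set.add_eq_ite ks k).symm)
    calc R.foldl (fun ks s => s.keys.foldl (fun ks k => if k ∈ ks then ks else ks ++ [k]) ks) []
        = R.foldl (fun ks s => s.keys.foldl PySem.Set.add ks) [] :=
          PySem.List.foldl_congr_mem _ _ _ _ (fun ks s _ => h1 ks s)
      _ = (R.flatMap (fun s => s.keys)).foldl PySem.Set.add [] := by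
          rw [List.flatMap_def, List.foldl_flatten, List.foldl_map]
      _ = PySem.Set.ofList (P.map Prod.fst) := by
          rw [hP, List.map_flatMap]
          rfl
  -- values agree for every key
  have hval : ∀ k : String, merged.getD k "" = pvLookup C k := by
    intro k
    rw [hm, pv_getD_foldl_insert, pvLookup]
    have hPrev : P.reverse = C.flatMap (fun s => s.items.reverse) := by
      rw [hP, hR, List.reverse_flatMap, List.reverse_reverse]
      rfl
    rw [hPrev, pv_values k C h]
    rfl
  -- assemble
  rw [hmerged]
  show (merged.items.filter fun p => !(p.1 == "extends"))
      = (List.filter (fun k => k != "extends")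
          (R.foldl (fun ks s => s.keys.foldl (fun ks k => if k ∈ ks then ks else ks ++ [k]) ks) [])).map
        (fun k => (k, pvLookup C k))
  rw [PySem.Dict.items_eq_map_keys merged hnd "", List.filter_map, hkeysB, hkeys]
  have hfil : (List.filter ((fun p => !p.1 == "extends") ∘ fun k => (k, merged.getD k ""))
        (PySem.Set.ofList (List.map Prod.fst P)))
      = List.filter (fun k => k != "extends") (PySem.Set.ofList (List.map Prod.fst P)) := rfl
  rw [hfil]
  exact List.map_congr_left (fun k _ => by rw [hval k])

-- every dict in either chain was built by Dict.ofList, so its keys are nodup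
lemma pv_chainB_nodup (section_ : List (String × List (String × String))) :
    ∀ (fuel : Nat) (name : String), ∀ s ∈ pvChainB section_ fuel name, s.keys.Nodup := by
  intro fuel
  induction fuel with
  | zero => intro name s hs; simp [pvChainB] at hs
  | succ fuel ih =>
    intro name s hs
    rw [pvChainB] at hs
    by_cases hn : name = ""
    · simp [hn] at hs
    · simp only [hn, if_false] at hs
      match hg : (PySem.Dict.ofList section_).get? name with
      | none => rw [hg] at hs; simp at hs
      | some raw =>
        rw [hg] at hs
        rcases List.mem_cons.mp hs with h | h
        · exact h ▸ PySem.Dict.nodup_keys_ofList raw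
        · exact ih _ s h

-- ===== VERDICT (by name: the statement is the Claim_ definition above) =====
theorem get_setting_spec : Claim_equal_get_setting := by
  intro section_ name _ hpre
  unfold Spec_get_setting
  simp only [get_setting, get_setting_alt, List.length_map]
  rw [pv_chain_eq section_ (section_.length + 1) (section_.map Prod.fst) name hpre]
  exact pv_merge (pvChainB section_ (section_.length + 1) name)
    (pv_chainB_nodup section_ (section_.length + 1) name)
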